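-- pv_equiv track=rewrite | github.com/Aimar1109/FUNDAMENTOS-DE-LA-PROGRAMACION | grafos/aeropuerto_grafos.py | crear_dict
-- ===== SOURCE A (Python) =====
-- def crear_dict(lista):
--     index = 0
--     dict_vuelos = {}
--     for vuelo in lista:
--         if vuelo[0] not in dict_vuelos.keys():
--             dict_vuelos[vuelo[0]] = index
--             index += 1
--     return dict_vuelos
-- ===== SOURCE B (Python) =====
-- def crear_dict(lista):
--     # Stateless quadratic reformulation: no counter, no growing dict.
--     # A key's index is the number of distinct first-elements strictly before
--     # its first occurrence, recomputed from the prefix at each position.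
--     firsts = [vuelo[0] for vuelo in lista]
--     return {k: len(set(firsts[:i]))
--             for i, k in enumerate(firsts)
--             if k not in firsts[:i]}
-- ===== Notes on version B (the rewrite author's own statement) =====
-- stated objective: alternative
-- what changed: Replaces A's single-pass accumulation (counter + growing dict with membership test) by a stateless comprehension that, for each position, recomputes the index as the number of distinct first-elements in the prefix before it (nested prefix scans, no mutable state); trades O(n) for O(n^2) simplicity of expression.
import Mathlib
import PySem

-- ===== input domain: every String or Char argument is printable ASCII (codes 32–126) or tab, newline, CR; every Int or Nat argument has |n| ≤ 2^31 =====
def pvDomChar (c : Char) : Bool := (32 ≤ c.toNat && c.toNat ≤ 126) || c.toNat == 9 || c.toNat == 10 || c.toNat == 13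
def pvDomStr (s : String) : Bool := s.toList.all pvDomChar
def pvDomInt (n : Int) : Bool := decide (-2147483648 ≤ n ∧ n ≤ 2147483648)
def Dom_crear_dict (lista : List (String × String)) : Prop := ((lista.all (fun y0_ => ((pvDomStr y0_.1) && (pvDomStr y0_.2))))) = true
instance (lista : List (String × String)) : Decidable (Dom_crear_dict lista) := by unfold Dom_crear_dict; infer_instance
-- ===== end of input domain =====

-- B replaces A's stateful single-pass loop (counter + growing dict) by a stateless
-- prefix-scan comprehension: each key's index is the count of distinct earlier firsts.
-- ===== PORT A =====
def crear_dict (lista : List (String × String)) : List (String × Int) :=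
  let st := lista.foldl
    (fun (st : Int × PySem.Dict String Int) vuelo =>
      if st.2.contains vuelo.1 then st
      else (st.1 + 1, st.2.insert vuelo.1 st.1))
    (0, PySem.Dict.empty)
  st.2.items

-- ===== PORT B =====
-- Port of Source B's dict comprehension: the 'k not in firsts[:i]' guard makes the emitted
-- keys distinct, so the comprehended dict's items are exactly the emitted pairs in order.
def crear_dict_alt (lista : List (String × String)) : List (String × Int) :=
  let firsts := lista.map (·.1)
  (PySem.List.enumerate firsts 0).filterMap (fun p =>
    let pref := PySem.List.slice firsts none (some p.1)
    if pref.contains p.2 then none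
    else some (p.2, ((PySem.Set.ofList pref).length : Int)))

-- ===== PRECONDITION & SPEC =====
def Spec_crear_dict (lista : List (String × String)) (out : List (String × Int)) : Prop := out = crear_dict_alt lista
instance (lista : List (String × String)) (out : List (String × Int)) : Decidable (Spec_crear_dict lista out) := by unfold Spec_crear_dict; infer_instance

-- ===== CLAIM (what is proved, stated in full; the proofs are below) =====
def Claim_equal_crear_dict : Prop := ∀ (lista : List (String × String)), Dom_crear_dict lista → Spec_crear_dict lista (crear_dict lista)

-- ===== LEMMAS AND PROOFS =====

/-- The dict state of A's loop, as a function of the list of keys seen so far. -/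
def pvDictOf (s : List String) : PySem.Dict String Int :=
  PySem.Dict.mk ((PySem.List.enumerate s 0).map (fun p => (p.2, p.1)))

theorem pvDictOf_contains (s : List String) (x : String) :
    (pvDictOf s).contains x = decide (x ∈ s) := by
  simp only [pvDictOf, PySem.Dict.contains_mk]
  have h : ((PySem.List.enumerate s 0).map (·.2)).any (· == x) = decide (x ∈ s) := by
    rw [PySem.List.map_snd_enumerate]
    apply Bool.eq_iff_iff.mpr
    simp only [List.any_eq_true, decide_eq_true_eq, beq_iff_eq]
    constructor
    · rintro ⟨y, hy, rfl⟩; exact hy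
    · intro hx; exact ⟨x, hx, rfl⟩
  rw [List.any_map] at h
  rw [List.any_map]
  exact h

theorem pvLoop_inv (l : List (String × String)) (s : List String) :
    l.foldl
      (fun (st : Int × PySem.Dict String Int) vuelo =>
        if st.2.contains vuelo.1 then st
        else (st.1 + 1, st.2.insert vuelo.1 st.1))
      ((s.length : Int), pvDictOf s)
    = (((PySem.Set.update s (l.map (·.1))).length : Int),
       pvDictOf (PySem.Set.update s (l.map (·.1)))) := by
  induction l generalizing s with
  | nil => simp [PySem.Set.update]
  | cons v l ih =>
    simp only [List.foldl_cons, List.map_cons, pvDictOf_contains]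
    have hupd : PySem.Set.update s (v.1 :: l.map (·.1)) =
        PySem.Set.update (PySem.Set.add s v.1) (l.map (·.1)) := rfl
    by_cases h : v.1 ∈ s
    · rw [if_pos (by simp [h])]
      have hadd : PySem.Set.add s v.1 = s := by
        simp [PySem.Set.add, List.contains_eq_mem, h]
      rw [hupd, hadd]
      exact ih s
    · rw [if_neg (by simp [h])]
      have hadd : PySem.Set.add s v.1 = s ++ [v.1] := by
        simp [PySem.Set.add, List.contains_eq_mem, h]
      have hd : (pvDictOf s).insert v.1 (s.length : Int) = pvDictOf (s ++ [v.1]) := by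
        apply PySem.Dict.ext
        rw [PySem.Dict.items_insert_of_not_contains _ _
              (by rw [pvDictOf_contains]; simp [h])]
        simp [pvDictOf, PySem.List.enumerate_append, PySem.List.enumerate_cons,
              PySem.List.enumerate_nil]
      rw [hupd, hadd, hd]
      have := ih (s ++ [v.1])
      simpa using this

/-- B's prefix-scan comprehension computes the enumerated ordered dedup. -/
theorem pvAlt_eq (s : List String) :
    (PySem.List.enumerate s 0).filterMap (fun p =>
        let pref := PySem.List.slice s none (some p.1)
        if pref.contains p.2 then none
        else some (p.2, ((PySem.Set.ofList pref).length : Int)))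
    = (PySem.List.enumerate (PySem.Set.ofList s) 0).map (fun p => (p.2, p.1)) := by
  induction s using List.reverseRecOn with
  | nil => simp [PySem.List.enumerate_nil]
  | append_singleton t x ih =>
    rw [PySem.List.enumerate_append, List.filterMap_append]
    have hpref : ∀ p ∈ PySem.List.enumerate t 0,
        PySem.List.slice (t ++ [x]) none (some p.1)
          = PySem.List.slice t none (some p.1) := by
      intro p hp
      rcases (PySem.List.mem_enumerate_iff t 0 p).1 hp with ⟨k, hk, rfl⟩
      simp only [Int.zero_add]
      rw [PySem.List.slice_to_natCast, PySem.List.slice_to_natCast,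
          List.take_append_of_le_length (Nat.le_of_lt hk)]
    have hfront :
        (PySem.List.enumerate t 0).filterMap (fun p =>
          let pref := PySem.List.slice (t ++ [x]) none (some p.1)
          if pref.contains p.2 then none
          else some (p.2, ((PySem.Set.ofList pref).length : Int)))
        = (PySem.List.enumerate t 0).filterMap (fun p =>
          let pref := PySem.List.slice t none (some p.1)
          if pref.contains p.2 then none
          else some (p.2, ((PySem.Set.ofList pref).length : Int))) := by
      apply List.filterMap_congr
      intro p hp
      simp only [hpref p hp]
    have hlast : PySem.List.slice (t ++ [x]) none (some ((t.length : Nat) : Int)) = t := by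
      rw [PySem.List.slice_to_natCast]
      simp
    have hofl : PySem.Set.ofList (t ++ [x]) = PySem.Set.add (PySem.Set.ofList t) x := by
      simp [PySem.Set.ofList_eq_foldl]
    rw [hfront, ih, hofl]
    by_cases hx : x ∈ t
    · have hadd : PySem.Set.add (PySem.Set.ofList t) x = PySem.Set.ofList t := by
        simp [PySem.Set.add, List.contains_eq_mem, PySem.Set.mem_ofList, hx]
      simp [hlast, hx]
    · have hadd : PySem.Set.add (PySem.Set.ofList t) x = PySem.Set.ofList t ++ [x] := by
        simp [PySem.Set.add, List.contains_eq_mem, PySem.Set.mem_ofList, hx]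
      simp [hlast, hx, PySem.List.enumerate_append,
            PySem.List.enumerate_cons, PySem.List.enumerate_nil]

-- ===== VERDICT (by name: the statement is the Claim_ definition above) =====
theorem crear_dict_spec : Claim_equal_crear_dict := by
  intro lista _
  unfold Spec_crear_dict crear_dict crear_dict_alt
  have h := pvLoop_inv lista []
  simp only [List.length_nil, Nat.cast_zero] at h
  rw [show (PySem.Dict.empty : PySem.Dict String Int) = pvDictOf [] from rfl, h]
  rw [pvAlt_eq]
  have : PySem.Set.update [] (lista.map (·.1)) = PySem.Set.ofList (lista.map (·.1)) := rfl
  rw [this]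
  rfl
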